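-- pv_equiv track=rewrite | github.com/Mikeymacc/ITP-115 | Assignments/project_McCarthy_Mikey/helper.py | getUniqueValues
-- ===== SOURCE A (Python) =====
-- def getUniqueValues(dataList, keyStr):
--     # creates empty list
--     unique = []
--     # goes through the given data list
--     for lang in dataList:
--         # gets the data that matches the key
--         value = lang.get(keyStr, "")
--         # if the value is not in the unique list, it adds it
--         if value not in unique:
--             unique.append(value)
--     # after creating the list, it is sorted then returned
--     unique.sort()
--     return unique
-- ===== SOURCE B (Python) =====
-- def getUniqueValues(dataList, keyStr):
--     # collect all values (with duplicates), sort, then drop adjacent duplicates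
--     vals = sorted([d.get(keyStr, "") for d in dataList])
--     result = []
--     for v in vals:
--         if not result or result[-1] != v:
--             result.append(v)
--     return result
-- ===== Notes on version B (the rewrite author's own statement) =====
-- stated objective: alternative
-- what changed: B maps all values out first, sorts the full multiset with sorted(), and removes duplicates in one linear pass comparing each element only to the last one kept, instead of A's per-element membership scan over the growing unique list followed by a sort.
import Mathlib
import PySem

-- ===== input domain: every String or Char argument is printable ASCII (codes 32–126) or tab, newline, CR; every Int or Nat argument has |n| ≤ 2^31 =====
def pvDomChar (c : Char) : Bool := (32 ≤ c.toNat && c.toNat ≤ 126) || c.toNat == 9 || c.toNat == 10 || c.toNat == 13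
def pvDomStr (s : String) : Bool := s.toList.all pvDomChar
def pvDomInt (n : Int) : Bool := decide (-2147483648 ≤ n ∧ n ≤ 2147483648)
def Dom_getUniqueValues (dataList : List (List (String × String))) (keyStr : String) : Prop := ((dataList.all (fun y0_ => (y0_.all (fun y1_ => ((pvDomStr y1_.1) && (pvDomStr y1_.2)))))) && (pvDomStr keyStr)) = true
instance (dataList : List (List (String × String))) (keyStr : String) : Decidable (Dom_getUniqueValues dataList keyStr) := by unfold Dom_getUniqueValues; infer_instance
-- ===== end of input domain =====

-- B sorts the full value list first and removes duplicates in one adjacent-comparison pass, instead of A's membership-scan dedup followed by a sort.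

-- shared helper: Python dict.get(keyStr, "") on an association list (first match)
def pvGet (lang : List (String × String)) (keyStr : String) : String :=
  (((lang.find? (fun p => p.1 == keyStr)).map Prod.snd).getD "")

-- ===== PORT A =====
def getUniqueValues (dataList : List (List (String × String))) (keyStr : String) : List String :=
  let unique := dataList.foldl (fun unique lang =>
    let value := pvGet lang keyStr
    if value ∈ unique then unique else unique ++ [value]) []
  PySem.List.sorted unique (fun x => x) false

-- ===== PORT B =====
def getUniqueValues_alt (dataList : List (List (String × String))) (keyStr : String) : List String :=
  let vals := PySem.List.sorted (dataList.map (fun d => pvGet d keyStr)) (fun x => x) false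
  vals.foldl (fun result v =>
    if result = [] ∨ result.getLast? ≠ some v then result ++ [v] else result) []

-- ===== PRECONDITION & SPEC =====
def Spec_getUniqueValues (dataList : List (List (String × String))) (keyStr : String) (out : List String) : Prop := out = getUniqueValues_alt dataList keyStr
instance (dataList : List (List (String × String))) (keyStr : String) (out : List String) : Decidable (Spec_getUniqueValues dataList keyStr out) := by unfold Spec_getUniqueValues; infer_instance

-- ===== CLAIM (what is proved, stated in full; the proofs are below) =====
def Claim_equal_getUniqueValues : Prop := ∀ (dataList : List (List (String × String))) (keyStr : String), Dom_getUniqueValues dataList keyStr → Spec_getUniqueValues dataList keyStr (getUniqueValues dataList keyStr)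

-- ===== LEMMAS AND PROOFS =====

-- recursive form of B's adjacent-dedup loop: state is the last kept element
def dstt : Option String → List String → List String
  | _, [] => []
  | p, v :: t => if p = some v then dstt p t else v :: dstt (some v) t

lemma foldl_eq_dstt (l : List String) (acc : List String) :
    l.foldl (fun result v =>
      if result = [] ∨ result.getLast? ≠ some v then result ++ [v] else result) acc
    = acc ++ dstt acc.getLast? l := by
  induction l generalizing acc with
  | nil => simp [dstt]
  | cons v t ih =>
    simp only [List.foldl_cons, dstt]
    by_cases h : acc.getLast? = some v
    · have hne : ¬ (acc = [] ∨ acc.getLast? ≠ some v) := by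
        rcases acc with _ | _ <;> simp_all
      rw [if_neg hne, if_pos h, ih]
    · have hor : acc = [] ∨ acc.getLast? ≠ some v := Or.inr h
      rw [if_pos hor, if_neg h, ih]
      simp

lemma dstt_props (l : List String) : ∀ (p : Option String),
    l.Pairwise (· ≤ ·) → (∀ x ∈ l, ∀ a, p = some a → a ≤ x) →
    (dstt p l).Pairwise (· < ·) ∧ (∀ x, x ∈ dstt p l ↔ x ∈ l ∧ p ≠ some x) := by
  induction l with
  | nil => intro p _ _; simp [dstt]
  | cons v t ih =>
    intro p hs hp
    have hvle : ∀ x ∈ t, v ≤ x := (List.pairwise_cons.mp hs).1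
    have ht : t.Pairwise (· ≤ ·) := (List.pairwise_cons.mp hs).2
    have ihv := ih (some v) ht (by intro x hx a ha; cases ha; exact hvle x hx)
    by_cases h : p = some v
    · subst h
      have e : dstt (some v) (v :: t) = dstt (some v) t := by simp [dstt]
      rw [e]
      refine ⟨ihv.1, fun x => ?_⟩
      rw [(ihv.2 x)]
      constructor
      · rintro ⟨hx, hne⟩
        exact ⟨List.mem_cons_of_mem _ hx, hne⟩
      · rintro ⟨hx, hne⟩
        rcases List.mem_cons.mp hx with rfl | hx
        · exact absurd rfl hne
        · exact ⟨hx, hne⟩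
    · have e : dstt p (v :: t) = v :: dstt (some v) t := by simp [dstt, h]
      rw [e]
      constructor
      · rw [List.pairwise_cons]
        refine ⟨fun x hx => ?_, ihv.1⟩
        rcases (ihv.2 x).mp hx with ⟨hxt, hne⟩
        exact lt_of_le_of_ne (hvle x hxt) (fun hvx => hne (by rw [hvx]))
      · intro x
        rw [List.mem_cons, (ihv.2 x)]
        constructor
        · rintro (rfl | ⟨hxt, hne⟩)
          · exact ⟨List.mem_cons_self, fun hpx => h hpx⟩
          · refine ⟨List.mem_cons_of_mem _ hxt, ?_⟩
            intro hpx
            have hxv : x ≤ v := hp v List.mem_cons_self x hpx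
            have hvx : v ≤ x := hvle x hxt
            exact hne (by rw [le_antisymm hvx hxv])
        · rintro ⟨hx, hpne⟩
          rcases List.mem_cons.mp hx with rfl | hxt
          · exact Or.inl rfl
          · by_cases hxv : x = v
            · exact Or.inl hxv
            · exact Or.inr ⟨hxt, fun hsx => hxv (Option.some.inj hsx).symm⟩

-- two strictly increasing lists with the same members are equal
lemma strict_sorted_ext (l1 l2 : List String)
    (h1 : l1.Pairwise (· < ·)) (h2 : l2.Pairwise (· < ·))
    (hm : ∀ x, x ∈ l1 ↔ x ∈ l2) : l1 = l2 := by
  have n1 : l1.Nodup := h1.imp (fun h => ne_of_lt h)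
  have n2 : l2.Nodup := h2.imp (fun h => ne_of_lt h)
  have hperm : l1.Perm l2 := (List.perm_ext_iff_of_nodup n1 n2).mpr hm
  exact List.Perm.eq_of_pairwise
    (fun a b _ _ hab hba => (lt_asymm hab hba).elim) h1 h2 hperm

-- ===== VERDICT (by name: the statement is the Claim_ definition above) =====
theorem getUniqueValues_spec : Claim_equal_getUniqueValues := by
  intro dataList keyStr _
  unfold Spec_getUniqueValues
  simp only [getUniqueValues, getUniqueValues_alt]
  set vals := dataList.map (fun d => pvGet d keyStr) with hvals
  -- A's dedup loop builds set(vals) in first-occurrence order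
  have hA : dataList.foldl (fun unique lang =>
      let value := pvGet lang keyStr
      if value ∈ unique then unique else unique ++ [value]) []
      = PySem.Set.ofList vals := by
    have h1 : dataList.foldl (fun unique lang =>
        let value := pvGet lang keyStr
        if value ∈ unique then unique else unique ++ [value]) []
        = dataList.foldl (fun s lang => PySem.Set.add s (pvGet lang keyStr)) [] :=
      PySem.List.foldl_congr_mem _ _ _ _
        (fun acc lang _ => (PySem.Set.add_eq_ite acc (pvGet lang keyStr)).symm)
    rw [h1, ← PySem.Set.update_map_eq_foldl_add, PySem.Set.update_nil_left, hvals]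
  rw [hA]
  -- B's loop is the adjacent-dedup recursion
  rw [foldl_eq_dstt]
  simp only [List.getLast?_nil, List.nil_append]
  have hsp : (PySem.List.sorted vals (fun x => x) false).Pairwise (· ≤ ·) := by
    have := PySem.List.sorted_pairwise vals (fun x => x)
    simpa using this
  have hd := dstt_props (PySem.List.sorted vals (fun x => x) false) none hsp
    (by intro x _ a ha; cases ha)
  apply strict_sorted_ext
  · exact PySem.List.sorted_ofList_pairwise_lt vals
  · exact hd.1
  · intro x
    rw [PySem.List.mem_sorted, PySem.Set.mem_ofList, hd.2 x, PySem.List.mem_sorted]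
    simp
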